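-- pv_equiv track=rewrite | github.com/iWarpBTC/tropic-playground | utils.py | decode_provisioning_date
-- ===== SOURCE A (Python) =====
-- def decode_provisioning_date(byte0: int, byte1: int) -> str:
--     date_value = (byte0 << 8) | byte1
--     year = (date_value // 1000) + 2023
--     day_of_year = date_value % 1000
--
--     is_leap = (year % 4 == 0)
--     days_in_months = [31, 29 if is_leap else 28, 31, 30, 31, 30,
--                       31, 31, 30, 31, 30, 31]
--     month_names = [
--         "January", "February", "March", "April", "May", "June",
--         "July", "August", "September", "October", "November", "December"
--     ]
--
--     month = 0
--     while month < 12 and day_of_year > days_in_months[month]: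
--         day_of_year -= days_in_months[month]
--         month += 1
--
--     if month >= 12:
--         return "Invalid date"
--     return f"{month_names[month]} {day_of_year}, {year}"
-- ===== SOURCE B (Python) =====
-- MONTH_NAMES = [
--     "January", "February", "March", "April", "May", "June",
--     "July", "August", "September", "October", "November", "December"
-- ]
--
--
-- def decode_provisioning_date(byte0: int, byte1: int) -> str:
--     date_value = (byte0 << 8) | byte1
--     year = (date_value // 1000) + 2023
--     d = date_value % 1000
--
--     feb = 29 if year % 4 == 0 else 28
--     cum = []
--     total = 0
--     for length in (31, feb, 31, 30, 31, 30, 31, 31, 30, 31, 30, 31):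
--         total += length
--         cum.append(total)
--
--     # binary search: first month index whose cumulative day count reaches d
--     lo, hi = 0, 12
--     while lo < hi:
--         mid = (lo + hi) // 2
--         if cum[mid] < d:
--             lo = mid + 1
--         else:
--             hi = mid
--
--     if lo >= 12:
--         return "Invalid date"
--     day = d - (cum[lo - 1] if lo > 0 else 0)
--     return f"{MONTH_NAMES[lo]} {day}, {year}"
-- ===== Notes on version B (the rewrite author's own statement) =====
-- stated objective: alternative
-- what changed: Replaces A's subtract-and-advance linear scan over the month lengths with a cumulative prefix table built once plus a hand-written bisect_left binary search for the month, recovering the day by one subtraction.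
import Mathlib
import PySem

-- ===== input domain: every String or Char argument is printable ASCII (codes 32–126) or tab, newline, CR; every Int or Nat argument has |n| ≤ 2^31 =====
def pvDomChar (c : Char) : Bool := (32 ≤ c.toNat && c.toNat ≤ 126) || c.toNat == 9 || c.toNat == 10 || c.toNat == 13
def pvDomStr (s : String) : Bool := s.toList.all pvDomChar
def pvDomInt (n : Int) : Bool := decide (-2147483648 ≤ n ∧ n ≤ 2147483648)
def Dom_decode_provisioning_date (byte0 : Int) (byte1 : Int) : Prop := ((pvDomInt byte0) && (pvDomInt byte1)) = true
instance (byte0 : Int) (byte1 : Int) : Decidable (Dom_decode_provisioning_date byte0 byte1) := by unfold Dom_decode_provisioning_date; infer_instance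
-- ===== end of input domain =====

-- B replaces A's subtract-and-advance month scan with a cumulative prefix table and a binary search (alternative decomposition, same cost class).

def pvMonthNames : List String :=
  ["January", "February", "March", "April", "May", "June",
   "July", "August", "September", "October", "November", "December"]

-- ===== PORT A =====
-- the while loop: while month < 12 and day_of_year > days_in_months[month]: … ;
-- dim[month] is read by walking the list alongside the month counter (same values, structural)
def pvALoopGo : List Int → Nat → Int → Nat × Int
  | [], month, d => (month, d)
  | m :: rest, month, d =>
    if month < 12 ∧ d > m then pvALoopGo rest (month + 1) (d - m) else (month, d)

def pvALoop (dim : List Int) (month : Nat) (d : Int) : Nat × Int := pvALoopGo dim month d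

def decode_provisioning_date (byte0 : Int) (byte1 : Int) : String :=
  let date_value := PySem.Int.bor (byte0 <<< (8 : Nat)) byte1
  let year := PySem.Int.floordiv date_value 1000 + 2023
  let day_of_year := PySem.Int.mod date_value 1000
  let is_leap : Bool := PySem.Int.mod year 4 == 0
  let dim : List Int := [31, if is_leap then 29 else 28, 31, 30, 31, 30, 31, 31, 30, 31, 30, 31]
  let r := pvALoop dim 0 day_of_year
  if 12 ≤ r.1 then "Invalid date"
  else PySem.List.pyGetD pvMonthNames (r.1 : Int) "" ++ " " ++ PySem.Int.toStr r.2 ++ ", " ++ PySem.Int.toStr year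

-- ===== PORT B =====
-- for length in months: total += length; cum.append(total)
def pvCumulative (months : List Int) : List Int :=
  (months.foldl (fun acc m => (acc.1 ++ [acc.2 + m], acc.2 + m)) (([] : List Int), (0 : Int))).1

-- bisect_left: first index lo in [lo, hi) with cum[lo] ≥ d
-- fuel hi - lo bounds the number of iterations; each step shrinks the interval, so it never runs out
def pvBisectGo (cum : List Int) (d : Int) : Nat → Nat → Nat → Nat
  | 0, lo, _ => lo
  | fuel + 1, lo, hi =>
    if lo < hi then
      let mid := (lo + hi) / 2
      if PySem.List.pyGetD cum (mid : Int) 0 < d then pvBisectGo cum d fuel (mid + 1) hi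
      else pvBisectGo cum d fuel lo mid
    else lo

def pvBisect (cum : List Int) (d : Int) (lo hi : Nat) : Nat := pvBisectGo cum d (hi - lo) lo hi

def decode_provisioning_date_alt (byte0 : Int) (byte1 : Int) : String :=
  let date_value := PySem.Int.bor (byte0 <<< (8 : Nat)) byte1
  let year := PySem.Int.floordiv date_value 1000 + 2023
  let d := PySem.Int.mod date_value 1000
  let feb : Int := if PySem.Int.mod year 4 == 0 then 29 else 28
  let cum := pvCumulative [31, feb, 31, 30, 31, 30, 31, 31, 30, 31, 30, 31]
  let lo := pvBisect cum d 0 12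
  if 12 ≤ lo then "Invalid date"
  else PySem.List.pyGetD pvMonthNames (lo : Int) "" ++ " " ++
       PySem.Int.toStr (d - (if 0 < lo then PySem.List.pyGetD cum ((lo : Int) - 1) 0 else 0)) ++ ", " ++
       PySem.Int.toStr year

-- ===== PRECONDITION & SPEC =====
def Spec_decode_provisioning_date (byte0 : Int) (byte1 : Int) (out : String) : Prop := out = decode_provisioning_date_alt byte0 byte1
instance (byte0 : Int) (byte1 : Int) (out : String) : Decidable (Spec_decode_provisioning_date byte0 byte1 out) := by unfold Spec_decode_provisioning_date; infer_instance

-- ===== CLAIM (what is proved, stated in full; the proofs are below) =====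
def Claim_equal_decode_provisioning_date : Prop := ∀ (byte0 : Int) (byte1 : Int), Dom_decode_provisioning_date byte0 byte1 → Spec_decode_provisioning_date byte0 byte1 (decode_provisioning_date byte0 byte1)

-- ===== LEMMAS AND PROOFS =====

-- core: for every leap flag and every day-of-year value 0 ≤ n < 1000, A's scan and
-- B's prefix-table binary search land on the same (month, day-in-month) pair
set_option maxRecDepth 10000 in
theorem pvCore : ∀ (b : Bool), ∀ n < 1000,
    pvALoop [31, if b then 29 else 28, 31, 30, 31, 30, 31, 31, 30, 31, 30, 31] 0 ((n : Nat) : Int)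
      = (pvBisect (pvCumulative [31, if b then (29 : Int) else 28, 31, 30, 31, 30, 31, 31, 30, 31, 30, 31]) ((n : Nat) : Int) 0 12,
         ((n : Nat) : Int) -
           (if 0 < pvBisect (pvCumulative [31, if b then (29 : Int) else 28, 31, 30, 31, 30, 31, 31, 30, 31, 30, 31]) ((n : Nat) : Int) 0 12 then
              PySem.List.pyGetD (pvCumulative [31, if b then (29 : Int) else 28, 31, 30, 31, 30, 31, 31, 30, 31, 30, 31])
                ((pvBisect (pvCumulative [31, if b then (29 : Int) else 28, 31, 30, 31, 30, 31, 31, 30, 31, 30, 31]) ((n : Nat) : Int) 0 12 : Int) - 1) 0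
            else 0)) := by
  decide

theorem pv_main : ∀ (byte0 : Int) (byte1 : Int),
    decode_provisioning_date byte0 byte1 = decode_provisioning_date_alt byte0 byte1 := by
  intro b0 b1
  unfold decode_provisioning_date decode_provisioning_date_alt
  set dv := PySem.Int.bor (b0 <<< (8 : Nat)) b1 with hdv
  have h0 : 0 ≤ PySem.Int.mod dv 1000 := PySem.Int.mod_nonneg _ (by norm_num)
  have h1 : PySem.Int.mod dv 1000 < 1000 := PySem.Int.mod_lt _ (by norm_num)
  obtain ⟨n, hn⟩ : ∃ n : Nat, PySem.Int.mod dv 1000 = (n : Int) :=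
    ⟨(PySem.Int.mod dv 1000).toNat, (Int.toNat_of_nonneg h0).symm⟩
  have hn1000 : n < 1000 := by omega
  simp only [hn]
  rw [pvCore (PySem.Int.mod (PySem.Int.floordiv dv 1000 + 2023) 4 == 0) n hn1000]

-- ===== VERDICT (by name: the statement is the Claim_ definition above) =====
theorem decode_provisioning_date_spec : Claim_equal_decode_provisioning_date := by
  intro b0 b1 _
  exact pv_main b0 b1
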